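-- pv_equiv track=rewrite | github.com/zeyadElshazly1/Analyist-pro | apps/api/app/services/analysis/orchestrator.py | generate_executive_panel
-- ===== SOURCE A (Python) =====
-- def generate_executive_panel(insights: list[dict]) -> dict:
--     """
--     Derive Opportunities, Risks, and an Action Plan from the top insights.
--     Returns a dict with three lists suitable for rendering on the frontend.
--     """
--     OPPORTUNITY_TYPES = {
--         "correlation", "segment", "leading_indicator", "concentration", "trend", "interaction"
--     }
--     RISK_TYPES = {
--         "anomaly", "data_quality", "multicollinearity", "simpsons_paradox", "missing_pattern"
--     }
--
--     opportunities: list[dict] = []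
--     risks: list[dict] = []
--     action_plan: list[dict] = []
--
--     for ins in insights:
--         itype = ins.get("type", "")
--         sev = ins.get("severity", "low")
--         title = ins.get("title", "")
--         action = ins.get("action", "")
--         finding = ins.get("finding", "")
--
--         if itype in OPPORTUNITY_TYPES and sev in ("high", "medium") and len(opportunities) < 4:
--             opportunities.append({
--                 "title": title,
--                 "summary": finding[:140] + ("…" if len(finding) > 140 else ""),
--                 "severity": sev,
--             })
--         elif itype in RISK_TYPES and sev in ("high", "medium") and len(risks) < 4:
--             risks.append({
--                 "title": title,
--                 "summary": finding[:140] + ("…" if len(finding) > 140 else ""),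
--                 "severity": sev,
--             })
--
--         if action and len(action_plan) < 5:
--             action_plan.append({
--                 "action": action[:180] + ("…" if len(action) > 180 else ""),
--                 "type": itype,
--                 "severity": sev,
--             })
--
--     return {
--         "opportunities": opportunities,
--         "risks": risks,
--         "action_plan": action_plan,
--     }
-- ===== SOURCE B (Python) =====
-- def generate_executive_panel(insights: list[dict]) -> dict:
--     """Three independent filter+format passes, each capped by a slice,
--     instead of one stateful loop with three counters."""
--     OPPORTUNITY_TYPES = {
--         "correlation", "segment", "leading_indicator", "concentration", "trend", "interaction"
--     }
--     RISK_TYPES = {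
--         "anomaly", "data_quality", "multicollinearity", "simpsons_paradox", "missing_pattern"
--     }
--
--     def clip(s, n):
--         return s[:n] + ("…" if len(s) > n else "")
--
--     def hot(ins):
--         return ins.get("severity", "low") in ("high", "medium")
--
--     def card(ins):
--         return {
--             "title": ins.get("title", ""),
--             "summary": clip(ins.get("finding", ""), 140),
--             "severity": ins.get("severity", "low"),
--         }
--
--     def step_item(ins):
--         return {
--             "action": clip(ins.get("action", ""), 180),
--             "type": ins.get("type", ""),
--             "severity": ins.get("severity", "low"),
--         }
--
--     return {
--         "opportunities": [card(i) for i in insights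
--                           if i.get("type", "") in OPPORTUNITY_TYPES and hot(i)][:4],
--         "risks": [card(i) for i in insights
--                   if i.get("type", "") in RISK_TYPES and hot(i)][:4],
--         "action_plan": [step_item(i) for i in insights if i.get("action", "")][:5],
--     }
-- ===== Notes on version B (the rewrite author's own statement) =====
-- stated objective: simpler
-- what changed: Replaces the single stateful loop that interleaves three capped accumulators with three independent filter+format comprehensions, each capped by a plain slice [:4]/[:4]/[:5].
import Mathlib
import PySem

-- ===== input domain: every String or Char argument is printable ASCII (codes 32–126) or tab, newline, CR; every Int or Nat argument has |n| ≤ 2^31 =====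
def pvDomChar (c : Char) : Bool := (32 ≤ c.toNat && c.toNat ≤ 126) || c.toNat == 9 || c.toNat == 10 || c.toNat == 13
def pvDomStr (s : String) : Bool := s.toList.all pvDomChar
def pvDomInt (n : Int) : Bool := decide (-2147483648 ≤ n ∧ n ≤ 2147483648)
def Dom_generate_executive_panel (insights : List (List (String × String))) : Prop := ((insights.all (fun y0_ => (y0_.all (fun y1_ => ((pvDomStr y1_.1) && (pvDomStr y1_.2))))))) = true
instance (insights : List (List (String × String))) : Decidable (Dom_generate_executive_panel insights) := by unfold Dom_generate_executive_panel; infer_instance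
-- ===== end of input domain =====

-- B replaces A's single stateful loop (three interleaved capped accumulators) with three
-- independent filter+format passes, each capped by a slice: simpler decomposition, same values.


-- shared Python primitives (both Pythons call dict.get and the same slice+ellipsis clip)
-- ins.get(k, dflt): first-match lookup in the association list (exact for a Python dict)
def pyGetStr (d : List (String × String)) (k dflt : String) : String :=
  match d.find? (fun p => p.1 == k) with
  | some p => p.2
  | none => dflt

-- s[:n] + ("…" if len(s) > n else ""): the slice bound n ≥ 0, so s[:n] is take n (exact);
-- when len(s) ≤ n the appended suffix is "" and s[:n] = s.
def pyClip (s : String) (n : Nat) : String :=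
  if s.toList.length > n then String.ofList (s.toList.take n) ++ "…" else s

-- ===== PORT A =====
def gepStepA (st : List (List (String × String)) × List (List (String × String)) × List (List (String × String)))
    (ins : List (String × String)) :
    List (List (String × String)) × List (List (String × String)) × List (List (String × String)) :=
  let itype := pyGetStr ins "type" ""
  let sev := pyGetStr ins "severity" "low"
  let title := pyGetStr ins "title" ""
  let action := pyGetStr ins "action" ""
  let finding := pyGetStr ins "finding" ""
  let opportunities := st.1
  let risks := st.2.1
  let action_plan := st.2.2
  let (opportunities, risks) :=
    if (["correlation", "segment", "leading_indicator", "concentration", "trend", "interaction"].contains itype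
        && ["high", "medium"].contains sev && opportunities.length < 4) then
      (opportunities ++ [[("title", title), ("summary", pyClip finding 140), ("severity", sev)]], risks)
    else if (["anomaly", "data_quality", "multicollinearity", "simpsons_paradox", "missing_pattern"].contains itype
        && ["high", "medium"].contains sev && risks.length < 4) then
      (opportunities, risks ++ [[("title", title), ("summary", pyClip finding 140), ("severity", sev)]])
    else (opportunities, risks)
  let action_plan :=
    if (action != "" && action_plan.length < 5) then
      action_plan ++ [[("action", pyClip action 180), ("type", itype), ("severity", sev)]]
    else action_plan
  (opportunities, risks, action_plan)

def generate_executive_panel (insights : List (List (String × String))) : List (String × List (List (String × String))) :=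
  let st := insights.foldl gepStepA ([], [], [])
  [("opportunities", st.1), ("risks", st.2.1), ("action_plan", st.2.2)]

-- ===== PORT B =====
def gepHot (ins : List (String × String)) : Bool :=
  ["high", "medium"].contains (pyGetStr ins "severity" "low")

def gepCard (ins : List (String × String)) : List (String × String) :=
  [("title", pyGetStr ins "title" ""), ("summary", pyClip (pyGetStr ins "finding" "") 140),
   ("severity", pyGetStr ins "severity" "low")]

def gepStepItem (ins : List (String × String)) : List (String × String) :=
  [("action", pyClip (pyGetStr ins "action" "") 180), ("type", pyGetStr ins "type" ""),
   ("severity", pyGetStr ins "severity" "low")]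

def generate_executive_panel_alt (insights : List (List (String × String))) : List (String × List (List (String × String))) :=
  [("opportunities",
    (((insights.filter (fun i =>
        ["correlation", "segment", "leading_indicator", "concentration", "trend", "interaction"].contains
          (pyGetStr i "type" "") && gepHot i)).map gepCard).take 4)),
   ("risks",
    (((insights.filter (fun i =>
        ["anomaly", "data_quality", "multicollinearity", "simpsons_paradox", "missing_pattern"].contains
          (pyGetStr i "type" "") && gepHot i)).map gepCard).take 4)),
   ("action_plan",
    (((insights.filter (fun i => pyGetStr i "action" "" != "")).map gepStepItem).take 5))]

-- ===== PRECONDITION & SPEC =====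
def Spec_generate_executive_panel (insights : List (List (String × String))) (out : List (String × List (List (String × String)))) : Prop := out = generate_executive_panel_alt insights
instance (insights : List (List (String × String))) (out : List (String × List (List (String × String)))) : Decidable (Spec_generate_executive_panel insights out) := by unfold Spec_generate_executive_panel; infer_instance

-- ===== CLAIM (what is proved, stated in full; the proofs are below) =====
def Claim_equal_generate_executive_panel : Prop := ∀ (insights : List (List (String × String))), Dom_generate_executive_panel insights → Spec_generate_executive_panel insights (generate_executive_panel insights)

-- ===== LEMMAS AND PROOFS =====

-- the two type sets are disjoint
lemma gep_disjoint (t : String)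
    (h : ["correlation", "segment", "leading_indicator", "concentration", "trend", "interaction"].contains t = true) :
    ["anomaly", "data_quality", "multicollinearity", "simpsons_paradox", "missing_pattern"].contains t = false := by
  simp at h ⊢
  rcases h with rfl | rfl | rfl | rfl | rfl | rfl <;> simp

-- the if/elif over the pair, with mutually exclusive guards, splits into two independent ifs
lemma gep_elif {α β : Type} (c1 c2 : Bool) (hx : c1 = true → c2 = false)
    (o o' : α) (r r' : β) :
    (if c1 = true then (o', r) else if c2 = true then (o, r') else (o, r)) =
      (if c1 = true then o' else o, if c2 = true then r' else r) := by
  by_cases h1 : c1 = true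
  · simp [h1, hx h1]
  · simp only [if_neg h1]
    split_ifs <;> rfl

-- the capped conditional append keeps its length bound
lemma gep_len_le {α : Type} (c : Bool) (o : List α) (x : α) (n : Nat) (ho : o.length ≤ n) :
    (if (c && decide (o.length < n)) = true then o ++ [x] else o).length ≤ n := by
  split_ifs with h
  · simp only [Bool.and_eq_true, decide_eq_true_eq] at h
    simp
    omega
  · exact ho

-- one capped accumulator step: appending (when the cap allows) then taking the remainder
-- equals taking from the conditionally-extended stream
lemma gep_cap_step {α : Type} (c : Bool) (o : List α) (x : α) (t : List α) (n : Nat)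
    (ho : o.length ≤ n) :
    (if (c && decide (o.length < n)) = true then o ++ [x] else o) ++
      t.take (n - (if (c && decide (o.length < n)) = true then o ++ [x] else o).length)
    = o ++ ((if c = true then x :: t else t).take (n - o.length)) := by
  by_cases hc : c = true
  · by_cases hn : o.length < n
    · have h1 : n - o.length = (n - (o.length + 1)) + 1 := by omega
      simp [hc, hn, h1]
    · have h0 : n - o.length = 0 := by omega
      simp [hc, hn, h0]
  · simp at hc
    simp [hc]

-- A's step in normal form: three independent capped conditional appends
lemma gep_step_eq (o r p : List (List (String × String))) (ins : List (String × String)) :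
    gepStepA (o, r, p) ins =
      ((if ((["correlation", "segment", "leading_indicator", "concentration", "trend", "interaction"].contains
            (pyGetStr ins "type" "") && gepHot ins) && decide (o.length < 4)) = true then o ++ [gepCard ins] else o),
       (if ((["anomaly", "data_quality", "multicollinearity", "simpsons_paradox", "missing_pattern"].contains
            (pyGetStr ins "type" "") && gepHot ins) && decide (r.length < 4)) = true then r ++ [gepCard ins] else r),
       (if ((pyGetStr ins "action" "" != "") && decide (p.length < 5)) = true then p ++ [gepStepItem ins] else p)) := by
  have hx : ((["correlation", "segment", "leading_indicator", "concentration", "trend", "interaction"].contains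
        (pyGetStr ins "type" "") && gepHot ins) && decide (o.length < 4)) = true →
      ((["anomaly", "data_quality", "multicollinearity", "simpsons_paradox", "missing_pattern"].contains
        (pyGetStr ins "type" "") && gepHot ins) && decide (r.length < 4)) = false := by
    intro h
    simp only [Bool.and_eq_true] at h
    simp only [gep_disjoint _ h.1.1, Bool.false_and]
  unfold gepStepA
  simp only [gepHot, gepCard, gepStepItem] at hx ⊢
  rw [gep_elif _ _ hx]

-- main loop invariant: the fold from a partial state appends the capped remainders
lemma gep_main (l : List (List (String × String)))
    (o r p : List (List (String × String)))
    (ho : o.length ≤ 4) (hr : r.length ≤ 4) (hp : p.length ≤ 5) :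
    l.foldl gepStepA (o, r, p) =
      (o ++ (((l.filter (fun i =>
          ["correlation", "segment", "leading_indicator", "concentration", "trend", "interaction"].contains
            (pyGetStr i "type" "") && gepHot i)).map gepCard).take (4 - o.length)),
       r ++ (((l.filter (fun i =>
          ["anomaly", "data_quality", "multicollinearity", "simpsons_paradox", "missing_pattern"].contains
            (pyGetStr i "type" "") && gepHot i)).map gepCard).take (4 - r.length)),
       p ++ (((l.filter (fun i => pyGetStr i "action" "" != "")).map gepStepItem).take (5 - p.length))) := by
  induction l generalizing o r p with
  | nil => simp
  | cons ins l ih =>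
    rw [List.foldl_cons, gep_step_eq,
      ih _ _ _ (gep_len_le _ o _ 4 ho) (gep_len_le _ r _ 4 hr) (gep_len_le _ p _ 5 hp)]
    refine congrArg₂ Prod.mk ?_ (congrArg₂ Prod.mk ?_ ?_) <;>
      simp only [List.filter_cons, apply_ite (List.map gepCard), apply_ite (List.map gepStepItem),
        List.map_cons] <;>
      exact gep_cap_step _ _ _ _ _ (by assumption)

-- ===== VERDICT (by name: the statement is the Claim_ definition above) =====
theorem generate_executive_panel_spec : Claim_equal_generate_executive_panel := by
  intro insights _
  unfold Spec_generate_executive_panel generate_executive_panel generate_executive_panel_alt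
  rw [gep_main insights [] [] [] (by simp) (by simp) (by simp)]
  simp
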